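-- pv_equiv track=rewrite | github.com/dante-pol/Array1D2D | arrays.py | min_among_odd
-- ===== SOURCE A (Python) =====
-- def min_among_odd(array):
--     if(len(array) == 1 and array[0] % 2 == 0):
--         return -1
--     elif(len(array) == 1):
--         return array[0]
--
--     min = array[0]
--     if(array[0] % 2 == 0):
--         for i in range(1, len(array)):
--             if(array[i] % 2 != 0):
--                 min = array[i]
--                 break
--
--     for i in range(1, len(array)):
--         if(min > array[i] and array[i] % 2 != 0):
--             min = array[i]
--
--     return min
-- ===== SOURCE B (Python) =====
-- def min_among_odd(array):
--     odds = [x for x in array if x % 2 != 0]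
--     return min(odds) if odds else -1
-- ===== Notes on version B (the rewrite author's own statement) =====
-- stated objective: simpler
-- what changed: B replaces A's special-casing of length-1 arrays plus a first-odd search loop and a second min-scan loop by one filter of the odd elements followed by min, returning -1 whenever no odd element exists.
-- intended difference: On arrays with at least two elements that are all even, A returns its first element (leftover loop state, an even value) while B returns -1, the intended sentinel for an array containing no odd element. — e.g. on min_among_odd([2, 4]): A returns 2, B returns -1
import Mathlib
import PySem

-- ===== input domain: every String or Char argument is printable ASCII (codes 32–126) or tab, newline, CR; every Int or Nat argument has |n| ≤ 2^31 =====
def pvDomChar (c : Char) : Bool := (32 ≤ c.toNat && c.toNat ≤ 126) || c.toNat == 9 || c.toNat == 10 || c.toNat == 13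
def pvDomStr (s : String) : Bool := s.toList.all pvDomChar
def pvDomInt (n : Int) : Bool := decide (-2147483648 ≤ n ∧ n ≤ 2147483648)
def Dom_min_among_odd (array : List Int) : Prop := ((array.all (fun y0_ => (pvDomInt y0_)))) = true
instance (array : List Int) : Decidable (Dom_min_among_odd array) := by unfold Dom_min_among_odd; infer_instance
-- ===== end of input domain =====

-- B simplifies A's two scanning loops to filter-the-odds + min, returning -1 when no odd element exists
-- (A's all-even multi-element value array[0] is stated as an intended difference D_ below).

-- ===== PORT A =====
-- first loop of A: for i in range(1, len): if array[i] % 2 != 0: min = array[i]; break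
def pvFirstOddA : List Int → Int → Int
  | [], m => m
  | x :: xs, m => if x % 2 ≠ 0 then x else pvFirstOddA xs m

def min_among_odd (array : List Int) : Int :=
  match array with
  | [] => 0  -- Python raises IndexError on array[0] here; excluded by Pre_min_among_odd
  | a0 :: rest =>
    if array.length = 1 ∧ a0 % 2 = 0 then -1
    else if array.length = 1 then a0
    else
      let m0 := a0
      let m1 := if a0 % 2 = 0 then pvFirstOddA rest m0 else m0
      rest.foldl (fun m x => if m > x ∧ x % 2 ≠ 0 then x else m) m1

-- ===== PORT B =====
def min_among_odd_alt (array : List Int) : Int :=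
  let odds := array.filter (fun x => x % 2 ≠ 0)
  match odds with
  | [] => -1
  | y :: ys => ys.foldl min y

-- ===== PRECONDITION & SPEC =====
-- Pre_ excludes only the empty array, on which A raises IndexError.
def Pre_min_among_odd (array : List Int) : Prop := array ≠ []
instance (array : List Int) : Decidable (Pre_min_among_odd array) := by unfold Pre_min_among_odd; infer_instance
def pvWitness_min_among_odd : List Int := [3, 2]

-- On arrays with at least two elements that are all even, A returns its first element (leftover loop state, an
-- even value) while B returns -1, the intended sentinel for an array containing no odd element.
def D_min_among_odd (array : List Int) : Prop :=
  2 ≤ array.length ∧ ∀ x ∈ array, x % 2 = 0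
instance (array : List Int) : Decidable (D_min_among_odd array) := by unfold D_min_among_odd; infer_instance

def Spec_min_among_odd (array : List Int) (out : Int) : Prop :=
  ¬ D_min_among_odd array → out = min_among_odd_alt array
instance (array : List Int) (out : Int) : Decidable (Spec_min_among_odd array out) := by unfold Spec_min_among_odd; infer_instance

def pvDiffWitness_min_among_odd : List Int := [2, 4]
def pvDiffWitnessOut_min_among_odd : Int × Int := (2, -1)

-- ===== CLAIM (what is proved, stated in full; the proofs are below) =====
def Claim_unchanged_min_among_odd : Prop := ∀ (array : List Int), Dom_min_among_odd array → Pre_min_among_odd array → Spec_min_among_odd array (min_among_odd array)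
def Claim_changed_min_among_odd : Prop := Dom_min_among_odd (pvDiffWitness_min_among_odd) ∧ Pre_min_among_odd (pvDiffWitness_min_among_odd) ∧ D_min_among_odd (pvDiffWitness_min_among_odd) ∧ min_among_odd (pvDiffWitness_min_among_odd) = pvDiffWitnessOut_min_among_odd.1 ∧ min_among_odd_alt (pvDiffWitness_min_among_odd) = pvDiffWitnessOut_min_among_odd.2 ∧ pvDiffWitnessOut_min_among_odd.1 ≠ pvDiffWitnessOut_min_among_odd.2
def Claim_exact_min_among_odd : Prop := ∀ (array : List Int), Dom_min_among_odd array → Pre_min_among_odd array → D_min_among_odd array → min_among_odd array ≠ min_among_odd_alt array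

-- ===== LEMMAS AND PROOFS =====

-- A's second loop, started at an odd seed, computes min over the seed and the odd elements.
theorem pv_loop_min (rest : List Int) : ∀ m : Int, m % 2 ≠ 0 →
    rest.foldl (fun m x => if m > x ∧ x % 2 ≠ 0 then x else m) m
      = (rest.filter (fun x => x % 2 ≠ 0)).foldl min m := by
  induction rest with
  | nil => intro m _; rfl
  | cons x xs ih =>
    intro m hm
    rw [List.foldl_cons, List.filter_cons]
    by_cases hx : x % 2 ≠ 0
    · rw [decide_eq_true hx, if_pos rfl, List.foldl_cons]
      by_cases hgt : m > x
      · rw [if_pos ⟨hgt, hx⟩, ih x hx]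
        congr 1
        exact (min_eq_right hgt.le).symm
      · rw [if_neg (by tauto), ih m hm]
        congr 1
        exact (min_eq_left (not_lt.mp hgt)).symm
    · rw [if_neg (by tauto), decide_eq_false hx, if_neg Bool.false_ne_true, ih m hm]

-- A's first loop returns the first odd element of rest, or the seed if none.
theorem pv_firstOdd (rest : List Int) (d : Int) :
    pvFirstOddA rest d =
      match rest.filter (fun x => x % 2 ≠ 0) with
      | [] => d
      | y :: _ => y := by
  induction rest with
  | nil => rfl
  | cons x xs ih =>
    rw [List.filter_cons]
    by_cases hx : x % 2 ≠ 0
    · rw [decide_eq_true hx, if_pos rfl]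
      show (if x % 2 ≠ 0 then x else pvFirstOddA xs d) = x
      rw [if_pos hx]
    · rw [decide_eq_false hx, if_neg Bool.false_ne_true]
      show (if x % 2 ≠ 0 then x else pvFirstOddA xs d) = _
      rw [if_neg hx, ih]

theorem min_among_odd_unfold (a0 : Int) (rest : List Int) (h2 : rest ≠ []) :
    min_among_odd (a0 :: rest) =
      rest.foldl (fun m x => if m > x ∧ x % 2 ≠ 0 then x else m)
        (if a0 % 2 = 0 then pvFirstOddA rest a0 else a0) := by
  have hlen : ¬ (a0 :: rest).length = 1 := by
    cases rest with
    | nil => exact absurd rfl h2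
    | cons b bs => simp [List.length]
  show (if (a0 :: rest).length = 1 ∧ a0 % 2 = 0 then -1
    else if (a0 :: rest).length = 1 then a0
    else _) = _
  rw [if_neg (by tauto), if_neg hlen]

-- when no odd element exists, A's second loop leaves the seed unchanged
theorem pv_loop_fix (l : List Int) : (∀ x ∈ l, x % 2 = 0) → ∀ m : Int,
    l.foldl (fun m x => if m > x ∧ x % 2 ≠ 0 then x else m) m = m := by
  induction l with
  | nil => intro _ m; rfl
  | cons x xs ih =>
    intro hl m
    have hx : x % 2 = 0 := hl x List.mem_cons_self
    rw [List.foldl_cons, if_neg (by tauto)]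
    exact ih (fun z hz => hl z (List.mem_cons_of_mem _ hz)) m

theorem pv_filter_nil (l : List Int) (hl : ∀ x ∈ l, x % 2 = 0) :
    l.filter (fun x => x % 2 ≠ 0) = [] := by
  rw [List.filter_eq_nil_iff]
  intro x hx
  simpa using hl x hx

-- ===== VERDICT (by name: the statement is the Claim_ definition above) =====
theorem min_among_odd_spec : Claim_unchanged_min_among_odd := by
  intro array _ hpre hnd
  match array with
  | [] => exact absurd rfl hpre
  | [a0] =>
    show min_among_odd [a0] = min_among_odd_alt [a0]
    by_cases h : a0 % 2 = 0
    · show (if [a0].length = 1 ∧ a0 % 2 = 0 then -1 else _) = _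
      rw [if_pos ⟨rfl, h⟩]
      show _ = (match [a0].filter (fun x => x % 2 ≠ 0) with
        | [] => (-1 : Int) | y :: ys => ys.foldl min y)
      rw [pv_filter_nil [a0] (by simpa using h)]
    · show (if [a0].length = 1 ∧ a0 % 2 = 0 then -1
        else if [a0].length = 1 then a0 else _) = _
      rw [if_neg (by tauto), if_pos (show [a0].length = 1 from rfl)]
      show _ = (match [a0].filter (fun x => x % 2 ≠ 0) with
        | [] => (-1 : Int) | y :: ys => ys.foldl min y)
      rw [List.filter_cons, decide_eq_true h, if_pos rfl, List.filter_nil]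
      rfl
  | a0 :: b :: rest' =>
    set rest := b :: rest' with hrest
    have hne : rest ≠ [] := by simp [hrest]
    rw [min_among_odd_unfold a0 rest hne]
    show _ = (match (a0 :: rest).filter (fun x => x % 2 ≠ 0) with
      | [] => (-1 : Int) | y :: ys => ys.foldl min y)
    by_cases h0 : a0 % 2 = 0
    · -- a0 even: odds come from rest only, and some odd element exists (¬D_)
      have hodds : (a0 :: rest).filter (fun x => x % 2 ≠ 0)
          = rest.filter (fun x => x % 2 ≠ 0) := by
        rw [List.filter_cons, decide_eq_false (by simpa using h0), if_neg Bool.false_ne_true]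
      have hnonnil : rest.filter (fun x => x % 2 ≠ 0) ≠ [] := by
        intro hnil
        apply hnd
        refine ⟨by simp [hrest, List.length], ?_⟩
        intro x hx
        rcases List.mem_cons.mp hx with hx1 | hx1
        · exact hx1 ▸ h0
        · by_contra hodd
          have hmem : x ∈ rest.filter (fun x => x % 2 ≠ 0) := by
            rw [List.mem_filter]
            exact ⟨hx1, by simpa using hodd⟩
          rw [hnil] at hmem
          exact absurd hmem (List.not_mem_nil)
      obtain ⟨y, ys, hys⟩ := List.exists_cons_of_ne_nil hnonnil
      have hyodd : y % 2 ≠ 0 := by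
        have hmem : y ∈ rest.filter (fun x => x % 2 ≠ 0) := by
          rw [hys]; exact List.mem_cons_self
        simpa using (List.mem_filter.mp hmem).2
      have hm1 : pvFirstOddA rest a0 = y := by rw [pv_firstOdd, hys]
      rw [if_pos h0, hm1, pv_loop_min rest y hyodd, hys, hodds, hys, List.foldl_cons,
        min_self]
    · -- a0 odd
      rw [if_neg h0, pv_loop_min rest a0 h0]
      conv_rhs => rw [List.filter_cons, decide_eq_true h0, if_pos rfl]

theorem min_among_odd_changed : Claim_changed_min_among_odd := by
  unfold Claim_changed_min_among_odd; decide

theorem min_among_odd_tight : Claim_exact_min_among_odd := by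
  intro array _ _ hd
  obtain ⟨hlen, hall⟩ := hd
  match array with
  | [] => simp at hlen
  | a0 :: rest =>
    have h0 : a0 % 2 = 0 := hall a0 List.mem_cons_self
    have hrall : ∀ x ∈ rest, x % 2 = 0 := fun x hx => hall x (List.mem_cons_of_mem _ hx)
    have hne : rest ≠ [] := by
      intro h; rw [h] at hlen; simp at hlen
    have hB : min_among_odd_alt (a0 :: rest) = -1 := by
      show (match (a0 :: rest).filter (fun x => x % 2 ≠ 0) with
        | [] => (-1 : Int) | y :: ys => ys.foldl min y) = -1
      rw [pv_filter_nil _ hall]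
    have hA : min_among_odd (a0 :: rest) = a0 := by
      rw [min_among_odd_unfold a0 rest hne, if_pos h0, pv_firstOdd,
        pv_filter_nil rest hrall]
      exact pv_loop_fix rest hrall a0
    rw [hA, hB]
    omega
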